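-- pv_equiv track=rewrite | github.com/viniciusmaeda/compara_yolo_torch | src/eval/analyze_results.py | get_model_run_map
-- ===== SOURCE A (Python) =====
-- from typing import Dict, List, Optional, Tuple
--
-- def get_model_run_map(runs: List[Tuple[int, str, str]]) -> Dict[str, List[str]]:
--     """Return model -> list of run directories sorted by fold."""
--     model_to_runs: Dict[str, List[Tuple[int, str]]] = {}
--     for fold, model, run_dir in runs:
--         model_to_runs.setdefault(model, []).append((fold, run_dir))
--
--     out: Dict[str, List[str]] = {}
--     for model, fold_runs in model_to_runs.items():
--         fold_runs_sorted = sorted(fold_runs, key=lambda x: x[0])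
--         out[model] = [run_dir for _, run_dir in fold_runs_sorted]
--     return out
-- ===== SOURCE B (Python) =====
-- def get_model_run_map(runs):
--     """Return model -> list of run directories sorted by fold.
--
--     Sort once by fold (stable), then group in a single linear pass; the first
--     loop only establishes key order (first appearance, as dicts preserve
--     insertion order)."""
--     out = {}
--     for _fold, model, _run_dir in runs:
--         out.setdefault(model, [])
--     for _fold, model, run_dir in sorted(runs, key=lambda r: r[0]):
--         out[model].append(run_dir)
--     return out
-- ===== Notes on version B (the rewrite author's own statement) =====
-- stated objective: alternative
-- what changed: A groups runs per model and then sorts each model's group separately; B sorts the whole run list once by fold (stable) and then fills the groups in a single linear pass, relying on sort stability for tie order.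
import Mathlib
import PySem

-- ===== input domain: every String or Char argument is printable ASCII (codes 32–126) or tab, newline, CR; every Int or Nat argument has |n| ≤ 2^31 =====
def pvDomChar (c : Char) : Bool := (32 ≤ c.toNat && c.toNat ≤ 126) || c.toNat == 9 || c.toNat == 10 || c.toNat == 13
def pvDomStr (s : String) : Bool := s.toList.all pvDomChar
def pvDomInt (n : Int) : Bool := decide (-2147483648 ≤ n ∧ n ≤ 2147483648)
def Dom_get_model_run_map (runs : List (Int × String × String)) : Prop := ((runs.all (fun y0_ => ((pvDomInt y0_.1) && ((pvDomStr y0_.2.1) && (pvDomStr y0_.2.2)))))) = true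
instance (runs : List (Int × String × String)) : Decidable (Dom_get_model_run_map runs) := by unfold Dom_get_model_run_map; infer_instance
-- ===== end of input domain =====

-- B replaces A's "group per model, then sort each group" by "one stable sort by fold,
-- then group in a single pass" (alternative decomposition, same cost).

-- ===== PORT A =====
-- model_to_runs.setdefault(model, []).append((fold, run_dir)) is exactly
-- modify model [] (· ++ [(fold, run_dir)]) on a PySem.Dict.
def get_model_run_map (runs : List (Int × String × String)) : List (String × List String) :=
  let model_to_runs : PySem.Dict String (List (Int × String)) :=
    runs.foldl (fun d t => d.modify t.2.1 [] (· ++ [(t.1, t.2.2)])) PySem.Dict.empty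
  let out : PySem.Dict String (List String) :=
    model_to_runs.items.foldl
      (fun o p => o.insert p.1 ((PySem.List.sorted p.2 (fun x => x.1) false).map (fun x => x.2)))
      PySem.Dict.empty
  out.items

-- ===== PORT B =====
-- out[model].append(run_dir): the key is always present (the first loop put it there),
-- so modify with default [] computes exactly the Python append.
def get_model_run_map_alt (runs : List (Int × String × String)) : List (String × List String) :=
  let out0 : PySem.Dict String (List String) :=
    runs.foldl (fun d t => d.setdefault t.2.1 []) PySem.Dict.empty
  let out : PySem.Dict String (List String) :=
    (PySem.List.sorted runs (fun r => r.1) false).foldl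
      (fun d t => d.modify t.2.1 [] (· ++ [t.2.2])) out0
  out.items

-- ===== PRECONDITION & SPEC =====
def Spec_get_model_run_map (runs : List (Int × String × String)) (out : List (String × List String)) : Prop := out = get_model_run_map_alt runs
instance (runs : List (Int × String × String)) (out : List (String × List String)) : Decidable (Spec_get_model_run_map runs out) := by unfold Spec_get_model_run_map; infer_instance

-- ===== CLAIM (what is proved, stated in full; the proofs are below) =====
def Claim_equal_get_model_run_map : Prop := ∀ (runs : List (Int × String × String)), Dom_get_model_run_map runs → Spec_get_model_run_map runs (get_model_run_map runs)

-- ===== LEMMAS AND PROOFS =====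

-- unfolding insertBy one step
theorem insertBy_cons_pos {α : Type} (bf : α → α → Bool) (x y : α) (ys : List α)
    (h : bf x y = true) : PySem.List.insertBy bf x (y :: ys) = x :: y :: ys := by
  simp [PySem.List.insertBy, h]

theorem insertBy_cons_neg {α : Type} (bf : α → α → Bool) (x y : α) (ys : List α)
    (h : bf x y = false) :
    PySem.List.insertBy bf x (y :: ys) = y :: PySem.List.insertBy bf x ys := by
  simp [PySem.List.insertBy, h]

-- insertBy x acc = x :: acc when x comes before every element of acc
theorem insertBy_all_before {α : Type} (bf : α → α → Bool) (x : α) (m : List α)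
    (h : ∀ z ∈ m, bf x z = true) : PySem.List.insertBy bf x m = x :: m := by
  cases m with
  | nil => rfl
  | cons y ys => exact insertBy_cons_pos bf x y ys (h y (by simp))

-- insertion into a key-sorted list keeps it key-sorted
theorem insertBy_pairwise {α κ : Type} [LinearOrder κ] (key : α → κ) (x : α) :
    ∀ (m : List α), m.Pairwise (fun a b => key a ≤ key b) →
    (PySem.List.insertBy (fun a b => decide (key a < key b)) x m).Pairwise
      (fun a b => key a ≤ key b) := by
  intro m
  induction m with
  | nil => intro _; simp [PySem.List.insertBy]
  | cons y ys ih =>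
    intro hp
    rw [List.pairwise_cons] at hp
    by_cases hxy : key x < key y
    · rw [insertBy_cons_pos _ _ _ _ (by simp [hxy])]
      refine List.Pairwise.cons ?_ (List.Pairwise.cons hp.1 hp.2)
      intro z hz
      rcases List.mem_cons.mp hz with hz | hz
      · subst hz; exact le_of_lt hxy
      · exact le_trans (le_of_lt hxy) (hp.1 z hz)
    · rw [insertBy_cons_neg _ _ _ _ (by simp [hxy])]
      refine List.Pairwise.cons ?_ (ih hp.2)
      intro z hz
      rcases (PySem.List.mem_insertBy _ _ _ _).mp hz with hz | hz
      · subst hz; exact le_of_not_gt hxy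
      · exact hp.1 z hz

-- filter commutes with a single stable insertion into a key-sorted list
theorem filter_insertBy {α κ : Type} [LinearOrder κ] (key : α → κ) (p : α → Bool) (x : α) :
    ∀ (m : List α), m.Pairwise (fun a b => key a ≤ key b) →
    (PySem.List.insertBy (fun a b => decide (key a < key b)) x m).filter p =
      (if p x then
        PySem.List.insertBy (fun a b => decide (key a < key b)) x (m.filter p)
       else m.filter p) := by
  intro m
  induction m with
  | nil => intro _; cases hpx : p x <;> simp [PySem.List.insertBy, List.filter, hpx]
  | cons y ys ih =>
    intro hp
    rw [List.pairwise_cons] at hp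
    by_cases hxy : key x < key y
    · rw [insertBy_cons_pos _ _ _ _ (by simp [hxy])]
      cases hpx : p x with
      | false => simp [List.filter_cons, hpx]
      | true =>
        cases hpy : p y with
        | true =>
          simp only [List.filter_cons, hpx, hpy, if_pos rfl, if_true]
          rw [insertBy_cons_pos _ _ _ _ (by simp [hxy])]
        | false =>
          simp only [List.filter_cons, hpx, hpy, if_true, Bool.false_eq_true, if_false]
          rw [insertBy_all_before]
          intro z hz
          exact decide_eq_true (lt_of_lt_of_le hxy (hp.1 z (List.mem_of_mem_filter hz)))
    · rw [insertBy_cons_neg _ _ _ _ (by simp [hxy])]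
      cases hpx : p x with
      | false =>
        have ihf := ih hp.2
        rw [if_neg (by simp [hpx])] at ihf
        simp only [List.filter_cons, hpx, Bool.false_eq_true, if_false, ihf]
      | true =>
        have iht := ih hp.2
        rw [if_pos hpx] at iht
        cases hpy : p y with
        | true =>
          simp only [List.filter_cons, hpx, hpy, if_true, iht]
          rw [insertBy_cons_neg _ _ _ _ (by simp [hxy])]
        | false =>
          simp only [List.filter_cons, hpx, hpy, if_true, Bool.false_eq_true, if_false, iht]

-- stable sorting commutes with filtering (fold form)
theorem foldl_insertBy_filter {α κ : Type} [LinearOrder κ] (key : α → κ) (p : α → Bool) :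
    ∀ (l acc : List α), acc.Pairwise (fun a b => key a ≤ key b) →
    (l.filter p).foldl
        (fun a x => PySem.List.insertBy (fun a b => decide (key a < key b)) x a)
        (acc.filter p)
      = (l.foldl (fun a x => PySem.List.insertBy (fun a b => decide (key a < key b)) x a)
          acc).filter p := by
  intro l
  induction l with
  | nil => intro acc _; rfl
  | cons t l ih =>
    intro acc hacc
    cases hpt : p t with
    | true =>
      rw [List.filter_cons_of_pos hpt, List.foldl_cons, List.foldl_cons,
        ← ih _ (insertBy_pairwise key t acc hacc), filter_insertBy key p t acc hacc]
      simp [hpt]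
    | false =>
      rw [List.filter_cons_of_neg (by simp [hpt]), List.foldl_cons,
        ← ih _ (insertBy_pairwise key t acc hacc), filter_insertBy key p t acc hacc]
      simp [hpt]

theorem sorted_filter_comm {α κ : Type} [LinearOrder κ] (key : α → κ) (p : α → Bool)
    (l : List α) :
    PySem.List.sorted (l.filter p) key false = (PySem.List.sorted l key false).filter p := by
  rw [PySem.List.sorted_eq_foldl_insertBy, PySem.List.sorted_eq_foldl_insertBy]
  exact foldl_insertBy_filter key p l [] (by simp)

-- stable sorting commutes with a key-compatible map (single insertion)
theorem insertBy_map {α β κ : Type} [LinearOrder κ] (g : α → β) (k : β → κ) (x : α) :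
    ∀ (m : List α),
    PySem.List.insertBy (fun a b => decide (k a < k b)) (g x) (m.map g) =
      (PySem.List.insertBy (fun a b => decide (k (g a) < k (g b))) x m).map g := by
  intro m
  induction m with
  | nil => rfl
  | cons y ys ih =>
    by_cases h : k (g x) < k (g y) <;> simp [PySem.List.insertBy, h, ih]

theorem sorted_map_comm {α β κ : Type} [LinearOrder κ] (g : α → β) (k : β → κ)
    (l : List α) :
    PySem.List.sorted (l.map g) k false =
      (PySem.List.sorted l (fun a => k (g a)) false).map g := by
  rw [PySem.List.sorted_eq_foldl_insertBy, PySem.List.sorted_eq_foldl_insertBy]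
  suffices h : ∀ (acc : List α),
      (l.map g).foldl (fun a x => PySem.List.insertBy (fun a b => decide (k a < k b)) x a)
          (acc.map g)
        = (l.foldl (fun a x =>
            PySem.List.insertBy (fun a b => decide (k (g a) < k (g b))) x a) acc).map g by
    simpa using h []
  induction l with
  | nil => intro acc; rfl
  | cons t l ih =>
    intro acc
    rw [List.map_cons, List.foldl_cons, List.foldl_cons, insertBy_map g k t acc, ih]

-- the items of B's first (setdefault) loop
theorem setdefault_fold_items (l : List (Int × String × String)) :
    ∀ (ks : List String), ks.Nodup →
    ∀ (d : PySem.Dict String (List String)), d.items = ks.map (fun m => (m, [])) →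
    (l.foldl (fun d t => d.setdefault t.2.1 []) d).items =
      (PySem.Set.update ks (l.map (fun t => t.2.1))).map (fun m => (m, [])) := by
  induction l with
  | nil => intro ks _ d hd; simpa [PySem.Set.update_nil] using hd
  | cons t l ih =>
    intro ks hnd d hd
    have hkeys : d.keys = ks := by
      simp [PySem.Dict.keys, hd, Function.comp_def]
    rw [List.map_cons, PySem.Set.update_cons, List.foldl_cons]
    by_cases hmem : t.2.1 ∈ ks
    · have hc : d.contains t.2.1 = true := by
        rw [PySem.Dict.contains_iff_mem_keys, hkeys]; exact hmem
      rw [PySem.Dict.setdefault_of_contains _ _ hc, PySem.Set.add_of_mem hmem]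
      exact ih ks hnd d hd
    · have hc : d.contains t.2.1 = false := by
        rw [← Bool.not_eq_true, PySem.Dict.contains_iff_mem_keys, hkeys]; exact hmem
      rw [PySem.Dict.setdefault_of_not_contains _ _ hc, PySem.Set.add_of_not_mem hmem]
      refine ih (ks ++ [t.2.1]) ?_ _ ?_
      · have : ∀ a ∈ ks, a ≠ t.2.1 := fun a ha hab => hmem (hab ▸ ha)
        simp [List.nodup_append, hnd]; exact this
      · rw [PySem.Dict.items_insert_of_not_contains _ _ hc, hd, List.map_append]; rfl

-- A's result, in closed form
theorem get_model_run_map_eq (runs : List (Int × String × String)) :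
    get_model_run_map runs =
      (PySem.Set.ofList (runs.map (fun t => t.2.1))).map (fun m =>
        (m, (PySem.List.sorted (runs.filter (fun t => t.2.1 == m)) (fun r => r.1) false).map
              (fun r => r.2.2))) := by
  unfold get_model_run_map
  dsimp only
  have hfold : runs.foldl (fun d t => d.modify t.2.1 [] (· ++ [(t.1, t.2.2)])) PySem.Dict.empty
      = (runs.map (fun t => (t.2.1, (t.1, t.2.2)))).foldl
          (fun d p => d.modify p.1 [] (· ++ [p.2])) PySem.Dict.empty := by
    exact List.foldl_map (f := fun (t : Int × String × String) => (t.2.1, (t.1, t.2.2)))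
      (g := fun (d : PySem.Dict String (List (Int × String))) (p : String × Int × String) =>
        d.modify p.1 [] (· ++ [p.2])) |>.symm
  have hkeys : (runs.foldl (fun d t => d.modify t.2.1 [] (· ++ [(t.1, t.2.2)]))
      PySem.Dict.empty).keys = PySem.Set.ofList (runs.map (fun t => t.2.1)) := by
    rw [PySem.Dict.keys_foldl_modify_key runs (fun t => t.2.1) []
      (fun _ t => (· ++ [(t.1, t.2.2)])) PySem.Dict.empty]
    simp [PySem.Set.update_nil_left]
  have hnd : (runs.foldl (fun d t => d.modify t.2.1 [] (· ++ [(t.1, t.2.2)]))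
      PySem.Dict.empty).keys.Nodup := by
    rw [hkeys]; exact PySem.Set.nodup_ofList _
  have hgetD : ∀ m, (runs.foldl (fun d t => d.modify t.2.1 [] (· ++ [(t.1, t.2.2)]))
      PySem.Dict.empty).getD m []
      = (runs.filter (fun t => t.2.1 == m)).map (fun t => (t.1, t.2.2)) := by
    intro m
    rw [hfold, PySem.Dict.getD_foldl_modify_append, PySem.Dict.getD_empty, List.filter_map,
      List.map_map]
    rfl
  have hitems : (runs.foldl (fun d t => d.modify t.2.1 [] (· ++ [(t.1, t.2.2)]))
      PySem.Dict.empty).items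
      = (PySem.Set.ofList (runs.map (fun t => t.2.1))).map (fun m =>
          (m, (runs.filter (fun t => t.2.1 == m)).map (fun t => (t.1, t.2.2)))) := by
    rw [PySem.Dict.items_eq_map_keys _ hnd [], hkeys]
    exact List.map_congr_left (fun m _ => by rw [hgetD m])
  have hfresh := PySem.Dict.items_foldl_insert_fresh
      ((runs.foldl (fun d t => d.modify t.2.1 [] (· ++ [(t.1, t.2.2)])) PySem.Dict.empty).items)
      (fun p => p.1)
      (fun p => (PySem.List.sorted p.2 (fun x => x.1) false).map (fun x => x.2))
      PySem.Dict.empty (fun a _ => PySem.Dict.contains_empty _)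
      (by
        have h : (runs.foldl (fun d t => d.modify t.2.1 [] (· ++ [(t.1, t.2.2)]))
            PySem.Dict.empty).items.map (fun p => p.1)
            = (runs.foldl (fun d t => d.modify t.2.1 [] (· ++ [(t.1, t.2.2)]))
                PySem.Dict.empty).keys := rfl
        rw [h]; exact hnd)
  rw [hfresh, hitems, List.map_map]
  rw [show (PySem.Dict.empty : PySem.Dict String (List String)).items = [] from rfl,
    List.nil_append]
  refine List.map_congr_left (fun m _ => ?_)
  simp only [Function.comp]
  rw [sorted_map_comm (fun t => (t.1, t.2.2)) (fun x => x.1) (runs.filter (fun t => t.2.1 == m)),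
    List.map_map]
  rfl

-- B's result, in the same closed form
theorem get_model_run_map_alt_eq (runs : List (Int × String × String)) :
    get_model_run_map_alt runs =
      (PySem.Set.ofList (runs.map (fun t => t.2.1))).map (fun m =>
        (m, (PySem.List.sorted (runs.filter (fun t => t.2.1 == m)) (fun r => r.1) false).map
              (fun r => r.2.2))) := by
  unfold get_model_run_map_alt
  dsimp only
  have h0 : (runs.foldl (fun d t => d.setdefault t.2.1 ([] : List String)) PySem.Dict.empty).items
      = (PySem.Set.ofList (runs.map (fun t => t.2.1))).map (fun m => (m, ([] : List String))) := by
    rw [setdefault_fold_items runs [] (by simp) PySem.Dict.empty (by rfl)]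
    rw [PySem.Set.update_nil_left]
  have hk0 : (runs.foldl (fun d t => d.setdefault t.2.1 ([] : List String)) PySem.Dict.empty).keys
      = PySem.Set.ofList (runs.map (fun t => t.2.1)) := by
    simp [PySem.Dict.keys, h0, Function.comp_def]
  have hfold : ∀ (d : PySem.Dict String (List String)),
      (PySem.List.sorted runs (fun r => r.1) false).foldl
        (fun d t => d.modify t.2.1 [] (· ++ [t.2.2])) d
      = ((PySem.List.sorted runs (fun r => r.1) false).map (fun t => (t.2.1, t.2.2))).foldl
          (fun d p => d.modify p.1 [] (· ++ [p.2])) d :=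
    fun d => by
      exact List.foldl_map (f := fun (t : Int × String × String) => (t.2.1, t.2.2))
        (g := fun (d : PySem.Dict String (List String)) (p : String × String) =>
          d.modify p.1 [] (· ++ [p.2])) |>.symm
  have hkeys : ((PySem.List.sorted runs (fun r => r.1) false).foldl
      (fun d t => d.modify t.2.1 [] (· ++ [t.2.2]))
      (runs.foldl (fun d t => d.setdefault t.2.1 ([] : List String)) PySem.Dict.empty)).keys
      = PySem.Set.ofList (runs.map (fun t => t.2.1)) := by
    rw [PySem.Dict.keys_foldl_modify_key (PySem.List.sorted runs (fun r => r.1) false)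
      (fun (t : Int × String × String) => t.2.1) ([] : List String)
      (fun _ (t : Int × String × String) => (· ++ [t.2.2])) _, hk0,
      PySem.Set.update_eq_append_filter,
      List.filter_eq_nil_iff.mpr, List.append_nil]
    intro y hy
    have hy1 : y ∈ runs.map (fun t => t.2.1) := by
      rcases List.mem_map.mp ((PySem.Set.mem_ofList _ _).mp hy) with ⟨t, ht, rfl⟩
      exact List.mem_map.mpr ⟨t, (PySem.List.mem_sorted _ _ _ _).mp ht, rfl⟩
    have hcon : PySem.Set.contains (PySem.Set.ofList (runs.map (fun t => t.2.1))) y = true := by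
      rw [PySem.Set.contains_iff]; exact (PySem.Set.mem_ofList _ _).mpr hy1
    rw [hcon]
    simp
  have hnd : ((PySem.List.sorted runs (fun r => r.1) false).foldl
      (fun d t => d.modify t.2.1 [] (· ++ [t.2.2]))
      (runs.foldl (fun d t => d.setdefault t.2.1 ([] : List String)) PySem.Dict.empty)).keys.Nodup := by
    rw [hkeys]; exact PySem.Set.nodup_ofList _
  have hnd0 : (runs.foldl (fun d t => d.setdefault t.2.1 ([] : List String)) PySem.Dict.empty).keys.Nodup := by
    rw [hk0]; exact PySem.Set.nodup_ofList _
  rw [PySem.Dict.items_eq_map_keys _ hnd [], hkeys]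
  refine List.map_congr_left (fun m hm => ?_)
  have hg0 : (runs.foldl (fun d t => d.setdefault t.2.1 ([] : List String)) PySem.Dict.empty).getD m [] = [] := by
    refine PySem.Dict.getD_of_mem_items _ ?_ hnd0 []
    rw [h0]; exact List.mem_map.mpr ⟨m, hm, rfl⟩
  rw [hfold, PySem.Dict.getD_foldl_modify_append, hg0, List.nil_append, List.filter_map,
    List.map_map]
  have : PySem.List.sorted (runs.filter (fun t => t.2.1 == m)) (fun r => r.1) false
      = (PySem.List.sorted runs (fun r => r.1) false).filter (fun t => t.2.1 == m) :=
    sorted_filter_comm (fun r => r.1) (fun t => t.2.1 == m) runs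
  rw [this]
  rfl

-- ===== VERDICT (by name: the statement is the Claim_ definition above) =====
theorem get_model_run_map_spec : Claim_equal_get_model_run_map := by
  intro runs _
  unfold Spec_get_model_run_map
  rw [get_model_run_map_eq, get_model_run_map_alt_eq]
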